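-- pv_equiv track=rewrite | github.com/IvanLudvig/LinearAlgebra | Gauss.py | delNullRows
-- ===== SOURCE A (Python) =====
-- from itertools import chain
--
-- def isNull(row):
--     return all(a == 0 for a in row)
--
-- def delNullRows(A, b):
--     n = len(A)
--     for i in range(n):
--         if isNull(A[i]):
--             A = [A[j] for j in chain(range(i), range(i + 1, n))]
--             b = [b[j] for j in chain(range(i), range(i + 1, n))]
--             return delNullRows(A, b)
--     return A, b
-- ===== SOURCE B (Python) =====
-- def isNull(row):
--     return all(a == 0 for a in row)
--
-- def delNullRows(A, b):
--     if all(not isNull(row) for row in A):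
--         return A, b
--     pairs = [(row, bi) for row, bi in zip(A, b) if not isNull(row)]
--     return [p[0] for p in pairs], [p[1] for p in pairs]
-- ===== Notes on version B (the rewrite author's own statement) =====
-- stated objective: simpler
-- what changed: Replaced the restart-from-zero recursion that rebuilds both lists by index slicing after each deletion with a single pass: a guard returning (A,b) when no row is all-zero, else one zip-and-filter over the paired rows.
import Mathlib
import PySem

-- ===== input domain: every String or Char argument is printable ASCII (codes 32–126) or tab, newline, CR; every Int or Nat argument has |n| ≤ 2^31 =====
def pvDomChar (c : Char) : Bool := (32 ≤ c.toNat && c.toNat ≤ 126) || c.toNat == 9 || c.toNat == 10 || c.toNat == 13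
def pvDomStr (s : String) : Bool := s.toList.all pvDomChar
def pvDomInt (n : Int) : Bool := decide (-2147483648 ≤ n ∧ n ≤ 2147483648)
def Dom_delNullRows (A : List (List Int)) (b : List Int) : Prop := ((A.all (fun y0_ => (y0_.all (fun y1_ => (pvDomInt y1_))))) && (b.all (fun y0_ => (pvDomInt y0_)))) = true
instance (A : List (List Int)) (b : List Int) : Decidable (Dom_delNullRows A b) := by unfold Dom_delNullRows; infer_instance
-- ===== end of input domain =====

-- B replaces A's restart-from-zero recursion (rebuild both lists by index after each deletion)
-- with a single zip-and-filter pass over the paired rows; equivalence proved on the inputs where A returns.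

-- ===== PORT A =====
def isNullA (row : List Int) : Bool := row.all (fun a => a == 0)

-- fuel = initial length of A; each recursive call of the Python shortens A by one,
-- so fuel never runs out on the recursions the Python actually makes.
-- b.getD j 0 : inside Pre_ every accessed index is in range (Python's b[j]); out of range Python raises (excluded by Pre_).
def delNullRowsGo : Nat → List (List Int) → List Int → List (List Int) × List Int
  | 0, A, b => (A, b)
  | fuel+1, A, b =>
    match A.findIdx? (fun r => isNullA r) with
    | none => (A, b)
    | some i =>
      let n := A.length
      let idxs := List.range i ++ List.range' (i+1) (n - (i+1))
      delNullRowsGo fuel (idxs.map (fun j => A.getD j [])) (idxs.map (fun j => b.getD j 0))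

def delNullRows (A : List (List Int)) (b : List Int) : List (List Int) × List Int :=
  delNullRowsGo A.length A b

-- ===== PORT B =====
def isNullB (row : List Int) : Bool := row.all (fun a => a == 0)

def delNullRows_alt (A : List (List Int)) (b : List Int) : List (List Int) × List Int :=
  if A.all (fun row => !isNullB row) then (A, b)
  else
    let pairs := (A.zip b).filter (fun p => !isNullB p.1)
    (pairs.map (fun p => p.1), pairs.map (fun p => p.2))

-- ===== PRECONDITION & SPEC =====
def nullRow (row : List Int) : Bool := row.all (fun a => a == 0)

-- Pre_ excludes exactly the inputs on which A raises IndexError while re-slicing b: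
-- some row of A is all-zero and b is shorter than A, except when only the last row is
-- all-zero and len(b) = len(A) - 1 (then the re-slice never reaches a bad index).
def Pre_delNullRows (A : List (List Int)) (b : List Int) : Prop :=
  A.length ≤ b.length ∨ (∀ row ∈ A, nullRow row = false) ∨
  (A.length = b.length + 1 ∧ ∀ row ∈ A.dropLast, nullRow row = false)
instance (A : List (List Int)) (b : List Int) : Decidable (Pre_delNullRows A b) := by unfold Pre_delNullRows; infer_instance

def pvWitness_delNullRows : List (List Int) × List Int := ([[1], [0]], [3, 4])

def Spec_delNullRows (A : List (List Int)) (b : List Int) (out : List (List Int) × List Int) : Prop := out = delNullRows_alt A b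
instance (A : List (List Int)) (b : List Int) (out : List (List Int) × List Int) : Decidable (Spec_delNullRows A b out) := by unfold Spec_delNullRows; infer_instance

-- ===== CLAIM (what is proved, stated in full; the proofs are below) =====
def Claim_equal_delNullRows : Prop := ∀ (A : List (List Int)) (b : List Int), Dom_delNullRows A b → Pre_delNullRows A b → Spec_delNullRows A b (delNullRows A b)

-- ===== LEMMAS AND PROOFS =====

lemma isNullB_eq (r : List Int) : isNullB r = isNullA r := rfl
lemma nullRow_eq (r : List Int) : nullRow r = isNullA r := rfl

-- the filtered zip that B computes in its else-branch
def zfilter (A : List (List Int)) (b : List Int) : List (List Int) × List Int :=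
  let ps := (A.zip b).filter (fun p => !isNullB p.1)
  (ps.map (fun p => p.1), ps.map (fun p => p.2))

lemma map_range_getD {α : Type} (l : List α) (d : α) (k : Nat) (hk : k ≤ l.length) :
    (List.range k).map (fun j => l.getD j d) = l.take k := by
  apply List.ext_getElem
  · simp [hk]
  · intro i h1 h2
    simp only [List.length_map, List.length_range] at h1
    rw [List.getElem_map, List.getElem_range, List.getElem_take,
      List.getD_eq_getElem?_getD, List.getElem?_eq_getElem (by omega)]
    rfl

lemma map_idxs_getD {α : Type} (l : List α) (d : α) (n i : Nat) (hi : i < n) (hn : n ≤ l.length) :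
    ((List.range i ++ List.range' (i+1) (n - (i+1))).map (fun j => l.getD j d)) = (l.take n).eraseIdx i := by
  apply List.ext_getElem
  · rw [List.length_map, List.length_append, List.length_range, List.length_range',
      List.length_eraseIdx_of_lt (by simp; omega), List.length_take]
    omega
  · intro k h1 h2
    simp only [List.length_map, List.length_append, List.length_range, List.length_range'] at h1
    rw [List.getElem_map, List.getElem_eraseIdx]
    by_cases hki : k < i
    · rw [List.getElem_append_left (by simpa using hki), dif_pos hki]
      simp only [List.getElem_range, List.getElem_take]
      rw [List.getD_eq_getElem?_getD, List.getElem?_eq_getElem (by omega)]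
      rfl
    · rw [List.getElem_append_right (by simpa using hki), dif_neg hki]
      simp only [List.length_range, List.getElem_range', List.getElem_take]
      have he : i + 1 + 1 * (k - i) = k + 1 := by omega
      rw [he, List.getD_eq_getElem?_getD, List.getElem?_eq_getElem (by omega)]
      rfl

lemma zip_eraseIdx {α β : Type} (A : List α) (b : List β) (i : Nat) :
    A.length = b.length → (A.eraseIdx i).zip (b.eraseIdx i) = (A.zip b).eraseIdx i := by
  induction A generalizing b i with
  | nil => simp
  | cons x A ih =>
    cases b with
    | nil => simp
    | cons y b =>
      intro h
      simp only [List.length_cons, Nat.add_right_cancel_iff] at h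
      cases i with
      | zero => simp [List.eraseIdx]
      | succ i => simp [List.eraseIdx_cons_succ, ih b i h]

lemma filter_eraseIdx_of_neg {α : Type} (l : List α) (p : α → Bool) (i : Nat)
    (h : i < l.length) (hp : p l[i] = false) : (l.eraseIdx i).filter p = l.filter p := by
  induction l generalizing i with
  | nil => simp
  | cons x l ih =>
    cases i with
    | zero => simp_all [List.eraseIdx]
    | succ i =>
      simp only [List.length_cons, Nat.succ_lt_succ_iff] at h
      simp only [List.getElem_cons_succ] at hp
      simp only [List.eraseIdx_cons_succ, List.filter_cons]
      rw [ih i h hp]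

lemma zip_take_length {α β : Type} (A : List α) (b : List β) :
    A.zip (b.take A.length) = A.zip b := by
  induction A generalizing b with
  | nil => simp
  | cons x A ih => cases b <;> simp [ih]

lemma zip_truncate {α β : Type} (A : List α) (b : List β) :
    A.zip b = (A.take b.length).zip b := by
  induction A generalizing b with
  | nil => simp
  | cons x A ih => cases b <;> simp [ih]

lemma zfilter_eraseIdx (A : List (List Int)) (b : List Int) (i : Nat)
    (hlen : A.length = b.length) (hi : i < A.length) (hnull : isNullA A[i] = true) :
    zfilter (A.eraseIdx i) (b.eraseIdx i) = zfilter A b := by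
  unfold zfilter
  rw [zip_eraseIdx A b i hlen,
    filter_eraseIdx_of_neg (A.zip b) _ i (by rw [List.length_zip]; omega)
      (by rw [List.getElem_zip]; simp only [isNullB_eq, Bool.not_eq_false']; exact hnull)]

-- main invariant: with equal lengths and enough fuel, A's recursion computes the zip-filter
lemma go_eq_zfilter (fuel : Nat) : ∀ (A : List (List Int)) (b : List Int),
    A.length = b.length → A.length ≤ fuel → delNullRowsGo fuel A b = zfilter A b := by
  induction fuel with
  | zero =>
    intro A b hlen hf
    have hA : A = [] := List.length_eq_zero_iff.mp (Nat.le_zero.mp hf)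
    subst hA
    have hb : b = [] := List.length_eq_zero_iff.mp hlen.symm
    subst hb
    simp [delNullRowsGo, zfilter]
  | succ fuel ih =>
    intro A b hlen hf
    cases hfind : A.findIdx? (fun r => isNullA r) with
    | none =>
      have hall : ∀ r ∈ A, isNullA r = false := by
        intro r hr
        simpa using List.findIdx?_eq_none_iff.mp hfind r hr
      simp only [delNullRowsGo, hfind]
      unfold zfilter
      rw [List.filter_eq_self.mpr (by
        intro p hp
        simp only [isNullB_eq, Bool.not_eq_true']
        exact hall p.1 (List.of_mem_zip hp).1)]
      show (A, b) = (List.map Prod.fst (A.zip b), List.map Prod.snd (A.zip b))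
      rw [List.map_fst_zip (le_of_eq hlen), List.map_snd_zip (le_of_eq hlen.symm)]
    | some i =>
      have hi : i < A.length := (List.findIdx?_eq_some_iff_findIdx_eq.mp hfind).1
      have hnull : isNullA A[i] = true := by
        obtain ⟨_, h, _⟩ := List.findIdx?_eq_some_iff_getElem.mp hfind
        simpa using h
      simp only [delNullRowsGo, hfind]
      rw [map_idxs_getD A [] A.length i hi (le_refl _),
          map_idxs_getD b 0 A.length i hi (by omega),
          List.take_length, hlen, List.take_length]
      rw [ih (A.eraseIdx i) (b.eraseIdx i)
        (by rw [List.length_eraseIdx_of_lt hi, List.length_eraseIdx_of_lt (by omega)]; omega)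
        (by rw [List.length_eraseIdx_of_lt hi]; omega)]
      exact zfilter_eraseIdx A b i hlen hi hnull

lemma eraseIdx_last {α : Type} (l : List α) :
    l.eraseIdx (l.length - 1) = l.dropLast := by
  rw [List.eraseIdx_eq_take_drop_succ, List.drop_eq_nil_of_le (by omega), List.append_nil,
    List.dropLast_eq_take]

theorem delNullRows_spec : Claim_equal_delNullRows := by
  unfold Claim_equal_delNullRows
  intro A b _ hPre
  unfold Spec_delNullRows delNullRows delNullRows_alt
  cases hfind : A.findIdx? (fun r => isNullA r) with
  | none =>
    have hall : ∀ r ∈ A, isNullA r = false := by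
      intro r hr
      simpa using List.findIdx?_eq_none_iff.mp hfind r hr
    rw [if_pos (by
      rw [List.all_eq_true]
      intro r hr
      simp only [isNullB_eq, Bool.not_eq_true']
      exact hall r hr)]
    cases hA : A with
    | nil => subst hA; simp [delNullRowsGo]
    | cons x A' =>
      rw [← hA]
      have hl : A.length = A'.length + 1 := by rw [hA]; simp
      rw [hl]
      simp only [delNullRowsGo, hfind]
  | some i =>
    have hi : i < A.length := (List.findIdx?_eq_some_iff_findIdx_eq.mp hfind).1
    have hnull : isNullA A[i] = true := by
      obtain ⟨_, h, _⟩ := List.findIdx?_eq_some_iff_getElem.mp hfind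
      simpa using h
    have hmem : A[i] ∈ A := List.getElem_mem hi
    rw [if_neg (by
      intro hcontra
      have := (List.all_eq_true.mp hcontra) A[i] hmem
      rw [isNullB_eq, Bool.not_eq_true', hnull] at this
      exact Bool.true_eq_false.mp this)]
    -- A has a null row, so Pre_ leaves two cases
    rcases hPre with hle | hnone | ⟨hlen1, hdrop⟩
    · -- len(A) ≤ len(b)
      obtain ⟨m, hm⟩ : ∃ m, A.length = m + 1 := ⟨A.length - 1, by omega⟩
      rw [hm]
      simp only [delNullRowsGo, hfind]
      rw [map_idxs_getD A [] A.length i hi (le_refl _),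
          map_idxs_getD b 0 A.length i hi hle, List.take_length]
      rw [go_eq_zfilter m (A.eraseIdx i) ((b.take A.length).eraseIdx i)
        (by rw [List.length_eraseIdx_of_lt hi, List.length_eraseIdx_of_lt (by simp; omega)]
            simp; omega)
        (by rw [List.length_eraseIdx_of_lt hi]; omega)]
      rw [zfilter_eraseIdx A (b.take A.length) i (by simp; omega) hi hnull]
      unfold zfilter
      rw [zip_take_length]
    · have := hnone A[i] hmem
      rw [nullRow_eq, hnull] at this
      exact absurd this (by simp)
    · -- len(A) = len(b) + 1, all rows before the last are non-null ⇒ i = last index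
      have hilast : i = A.length - 1 := by
        by_contra hne
        have hmemd : A[i] ∈ A.dropLast := by
          rw [List.dropLast_eq_take]
          exact List.mem_take_iff_getElem.mpr ⟨i, by omega, rfl⟩
        have := hdrop _ hmemd
        rw [nullRow_eq, hnull] at this
        exact absurd this (by simp)
      obtain ⟨m, hm⟩ : ∃ m, A.length = m + 1 := ⟨A.length - 1, by omega⟩
      rw [hm]
      simp only [delNullRowsGo, hfind]
      rw [map_idxs_getD A [] A.length i hi (le_refl _), List.take_length]
      have hidx2 : (List.range i ++ List.range' (i+1) (A.length - (i+1))).map (fun j => b.getD j 0) = b := by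
        rw [hilast]
        have h0 : A.length - (A.length - 1 + 1) = 0 := by omega
        rw [h0]
        simp only [List.range'_zero, List.append_nil]
        rw [map_range_getD b 0 (A.length - 1) (by omega), List.take_of_length_le (by omega)]
      rw [hidx2, hilast, eraseIdx_last A]
      rw [go_eq_zfilter m A.dropLast b (by simp [List.length_dropLast]; omega)
        (by simp [List.length_dropLast]; omega)]
      unfold zfilter
      rw [zip_truncate A b]
      have ht : A.take b.length = A.dropLast := by
        rw [List.dropLast_eq_take]; congr 1; omega
      rw [ht]
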